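-- pv_equiv track=rewrite | github.com/posl/comment_recommendation | script/mod_gen/1_time/ja/137_C/5.py | get_anagram_count
-- ===== SOURCE A (Python) =====
-- def get_anagram_count(s_list):
--     s_dict = {}
--     count = 0
--     for s in s_list:
--         s_dict[s] = s_dict.get(s, 0) + 1
--     for s in s_list:
--         s_dict[s] -= 1
--         for i in range(len(s)):
--             s_dict[s[i + 1:] + s[:i + 1]] = s_dict.get(s[i + 1:] + s[:i + 1], 0) + 1
--     for s in s_list:
--         count += s_dict[s]
--     return count
-- ===== SOURCE B (Python) =====
-- def get_anagram_count(s_list):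
--     # Build a frozen multiplicity table once, then sum, for each distinct
--     # string, count(s) * sum of counts of its rotations (k = 1..len(s)).
--     cnt = {}
--     for s in s_list:
--         cnt[s] = cnt.get(s, 0) + 1
--     total = 0
--     for s, c in cnt.items():
--         for k in range(1, len(s) + 1):
--             total += c * cnt.get(s[k:] + s[:k], 0)
--     return total
-- ===== Notes on version B (the rewrite author's own statement) =====
-- stated objective: faster
-- what changed: A mutates a shared dict in three passes (count, decrement-then-bump every rotation of every occurrence, re-read); B freezes one counter and sums count(s) * count(rotation) over the distinct strings only, scanning each distinct string's rotations once.
import Mathlib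
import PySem

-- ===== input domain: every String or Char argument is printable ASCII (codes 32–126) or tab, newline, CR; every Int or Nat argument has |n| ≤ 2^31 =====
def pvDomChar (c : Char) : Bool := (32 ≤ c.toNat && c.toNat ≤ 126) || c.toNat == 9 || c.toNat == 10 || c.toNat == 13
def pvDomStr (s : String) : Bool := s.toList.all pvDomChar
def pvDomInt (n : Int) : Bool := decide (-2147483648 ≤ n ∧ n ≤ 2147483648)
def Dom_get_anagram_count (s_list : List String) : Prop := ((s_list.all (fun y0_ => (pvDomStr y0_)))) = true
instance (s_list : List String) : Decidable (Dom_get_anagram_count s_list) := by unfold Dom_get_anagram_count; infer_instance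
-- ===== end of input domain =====

-- B replaces A's three-pass dict-mutation trick by a frozen counter and a rotation
-- scan done once per DISTINCT string (count(s) * count(rotation) summed); return
-- value only, no argument is mutated by either program.

-- ===== PORT A =====
-- the key A builds in its inner loop: s[i+1:] + s[:i+1]
def pvRotKeyA (s : String) (i : Int) : String :=
  PySem.Str.slice s (some (i + 1)) none ++ PySem.Str.slice s none (some (i + 1))

def get_anagram_count (s_list : List String) : Int :=
  -- s_dict = {}; for s in s_list: s_dict[s] = s_dict.get(s, 0) + 1
  let d0 : PySem.Dict String Int :=
    s_list.foldl (fun d s => d.insert s (d.getD s 0 + 1)) PySem.Dict.empty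
  -- for s in s_list: s_dict[s] -= 1; for i in range(len(s)): s_dict[rot] = s_dict.get(rot, 0) + 1
  -- (`s_dict[s] -= 1` never raises: the first loop put every s of s_list into the dict)
  let d1 : PySem.Dict String Int :=
    s_list.foldl (fun d s =>
      (PySem.List.pyRange 0 (PySem.Str.len s) 1).foldl
        (fun d i => d.insert (pvRotKeyA s i) (d.getD (pvRotKeyA s i) 0 + 1))
        (d.insert s (d.getD s 0 - 1))) d0
  -- for s in s_list: count += s_dict[s]
  s_list.foldl (fun c s => c + d1.getD s 0) 0

-- ===== PORT B =====
-- the key B builds: s[k:] + s[:k]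
def pvRotKeyB (s : String) (k : Int) : String :=
  PySem.Str.slice s (some k) none ++ PySem.Str.slice s none (some k)

def get_anagram_count_alt (s_list : List String) : Int :=
  -- cnt = {}; for s in s_list: cnt[s] = cnt.get(s, 0) + 1
  let cnt : PySem.Dict String Int :=
    s_list.foldl (fun d s => d.insert s (d.getD s 0 + 1)) PySem.Dict.empty
  -- for s, c in cnt.items(): for k in range(1, len(s) + 1): total += c * cnt.get(s[k:] + s[:k], 0)
  cnt.items.foldl (fun total p =>
    (PySem.List.pyRange 1 (PySem.Str.len p.1 + 1) 1).foldl
      (fun total k => total + p.2 * cnt.getD (pvRotKeyB p.1 k) 0) total) 0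

-- ===== PRECONDITION & SPEC =====
def Spec_get_anagram_count (s_list : List String) (out : Int) : Prop := out = get_anagram_count_alt s_list
instance (s_list : List String) (out : Int) : Decidable (Spec_get_anagram_count s_list out) := by unfold Spec_get_anagram_count; infer_instance

-- ===== CLAIM (what is proved, stated in full; the proofs are below) =====
def Claim_equal_get_anagram_count : Prop := ∀ (s_list : List String), Dom_get_anagram_count s_list → Spec_get_anagram_count s_list (get_anagram_count s_list)

-- ===== LEMMAS AND PROOFS =====

-- the list of all rotation keys A (and, shifted by one, B) generates for s
def pvRots (s : String) : List String :=
  (PySem.List.pyRange 0 (PySem.Str.len s) 1).map (pvRotKeyA s)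

lemma pv_pyRange_shift (n : Nat) : ∀ a b : Int, (b - a).toNat = n →
    PySem.List.pyRange (a + 1) (b + 1) 1 = (PySem.List.pyRange a b 1).map (· + 1) := by
  induction n with
  | zero =>
    intro a b h
    rw [PySem.List.pyRange_one_eq_nil (by omega), PySem.List.pyRange_one_eq_nil (by omega)]
    rfl
  | succ n ih =>
    intro a b h
    rw [PySem.List.pyRange_one_cons (by omega : a < b),
        PySem.List.pyRange_one_cons (by omega : a + 1 < b + 1),
        List.map_cons, ih (a + 1) b (by omega)]

-- A's inner loop adds 1 at each rotation key
lemma pv_inner_getD (s : String) (d : PySem.Dict String Int) (t : String) :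
    ((PySem.List.pyRange 0 (PySem.Str.len s) 1).foldl
      (fun d i => d.insert (pvRotKeyA s i) (d.getD (pvRotKeyA s i) 0 + 1)) d).getD t 0
      = d.getD t 0 + ((pvRots s).count t : Int) := by
  rw [pvRots, ← PySem.Dict.getD_foldl_insert_add_one
    ((PySem.List.pyRange 0 (PySem.Str.len s) 1).map (pvRotKeyA s)) d t, List.foldl_map]

-- A's second loop, fully characterised
lemma pv_loop2_getD (l2 : List String) : ∀ (d : PySem.Dict String Int) (t : String),
    (l2.foldl (fun d s =>
      (PySem.List.pyRange 0 (PySem.Str.len s) 1).foldl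
        (fun d i => d.insert (pvRotKeyA s i) (d.getD (pvRotKeyA s i) 0 + 1))
        (d.insert s (d.getD s 0 - 1))) d).getD t 0
      = d.getD t 0 - (l2.count t : Int)
        + (l2.map (fun s => ((pvRots s).count t : Int))).sum := by
  induction l2 with
  | nil => intro d t; simp
  | cons s l2 ih =>
    intro d t
    rw [List.foldl_cons, ih, pv_inner_getD, PySem.Dict.getD_insert]
    by_cases hts : t = s
    · subst hts; simp; ring
    · simp [hts, Ne.symm hts]; ring

-- A reduced to a double sum over the input list
lemma pv_A_eq (l : List String) :
    get_anagram_count l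
      = (l.map (fun t => (l.map (fun s => ((pvRots s).count t : Int))).sum)).sum := by
  simp only [get_anagram_count, PySem.Dict.foldl_insert_getD_add_one_eq_counter]
  rw [PySem.List.foldl_add l _ 0, zero_add]
  apply congrArg
  apply List.map_congr_left
  intro t _
  rw [pv_loop2_getD, PySem.Dict.getD_counter]
  ring

-- B's inner loop is a sum over the same rotation keys
lemma pv_B_inner (cnt : PySem.Dict String Int) (c : Int) (s : String) (total : Int) :
    (PySem.List.pyRange 1 (PySem.Str.len s + 1) 1).foldl
      (fun total k => total + c * cnt.getD (pvRotKeyB s k) 0) total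
      = total + c * ((pvRots s).map (fun r => cnt.getD r 0)).sum := by
  have hsh : PySem.List.pyRange 1 (PySem.Str.len s + 1) 1
      = (PySem.List.pyRange 0 (PySem.Str.len s) 1).map (· + 1) := by
    have := pv_pyRange_shift (PySem.Str.len s).toNat 0 (PySem.Str.len s) (by omega)
    simpa using this
  rw [hsh, List.foldl_map, PySem.List.foldl_add, pvRots, List.map_map]
  congr 1
  rw [← List.sum_map_mul_left]
  rfl

-- B reduced to a grouped sum over the distinct strings
lemma pv_B_eq (l : List String) :
    get_anagram_count_alt l
      = ((PySem.Set.ofList l).map (fun s =>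
          (l.count s : Int) * ((pvRots s).map (fun r => (l.count r : Int))).sum)).sum := by
  rw [get_anagram_count_alt]
  simp only [PySem.Dict.foldl_insert_getD_add_one_eq_counter]
  have hbody : (fun (total : Int) (p : String × Int) =>
      (PySem.List.pyRange 1 (PySem.Str.len p.1 + 1) 1).foldl
        (fun total k => total + p.2 * (PySem.Dict.counter l).getD (pvRotKeyB p.1 k) 0) total)
      = (fun total p =>
        total + p.2 * ((pvRots p.1).map (fun r => (PySem.Dict.counter l).getD r 0)).sum) := by
    funext total p
    exact pv_B_inner (PySem.Dict.counter l) p.2 p.1 total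
  rw [hbody, PySem.List.foldl_add, zero_add, PySem.Dict.items_counter, List.map_map]
  apply congrArg
  apply List.map_congr_left
  intro s _
  simp [PySem.Dict.getD_counter]

-- swapping a double Int sum
lemma pv_sum_swap {α β : Type} (l : List α) (l' : List β) (g : β → α → Int) :
    (l.map (fun t => (l'.map (fun s => g s t)).sum)).sum
      = (l'.map (fun s => (l.map (fun t => g s t)).sum)).sum := by
  induction l' with
  | nil => simp
  | cons a l' ih =>
    simp only [List.map_cons, List.sum_cons, ← ih]
    exact PySem.List.sum_map_add_int l (fun t => g a t) (fun t => (List.map (fun s => g s t) l').sum)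

-- double counting: summing rs.count over l = summing l.count over rs
lemma pv_sum_count_swap (l rs : List String) :
    (l.map (fun t => ((rs.count t : Nat) : Int))).sum
      = (rs.map (fun r => ((l.count r : Nat) : Int))).sum := by
  have hcount : ∀ (xs : List String) (v : String),
      ((xs.count v : Nat) : Int) = (xs.map (fun x => if x = v then 1 else 0)).sum := by
    intro xs v
    rw [List.count_eq_countP (l := xs)]
    rw [← PySem.List.sum_map_ite_one_zero (fun x => x == v) xs]
    simp
  calc (l.map (fun t => ((rs.count t : Nat) : Int))).sum
      = (l.map (fun t => (rs.map (fun r => if r = t then 1 else 0)).sum)).sum := by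
        apply congrArg; apply List.map_congr_left; intro t _
        rw [hcount rs t]
    _ = (rs.map (fun r => (l.map (fun t => if r = t then 1 else 0)).sum)).sum :=
        pv_sum_swap l rs (fun r t => if r = t then 1 else 0)
    _ = (rs.map (fun r => ((l.count r : Nat) : Int))).sum := by
        apply congrArg; apply List.map_congr_left; intro r _
        rw [hcount l r]
        apply congrArg; apply List.map_congr_left; intro t _
        simp [eq_comm]

-- grouping a sum over the list by its distinct elements
lemma pv_sum_group (l : List String) (f : String → Int) :
    (l.map f).sum
      = ((PySem.Set.ofList l).map (fun s => (l.count s : Int) * f s)).sum := by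
  have h1 : (l.map f).sum = ∑ a ∈ l.toFinset, (l.count a) • f a := by
    simpa using Finset.sum_multiset_map_count (l : Multiset String) f
  have h2 : l.toFinset = ((PySem.Set.ofList l : List String)).toFinset := by
    apply Finset.ext; intro x
    simp [PySem.Set.mem_ofList]
  rw [h1, h2, List.sum_toFinset _ (PySem.Set.nodup_ofList l)]
  apply congrArg; apply List.map_congr_left; intro s _
  simp

-- ===== VERDICT (by name: the statement is the Claim_ definition above) =====
theorem get_anagram_count_spec : Claim_equal_get_anagram_count := by
  intro l _
  show get_anagram_count l = get_anagram_count_alt l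
  rw [pv_A_eq, pv_B_eq, pv_sum_swap l l (fun s t => ((pvRots s).count t : Int))]
  have h : (l.map (fun s => (l.map (fun t => ((pvRots s).count t : Int))).sum)).sum
      = (l.map (fun s => ((pvRots s).map (fun r => (l.count r : Int))).sum)).sum := by
    apply congrArg; apply List.map_congr_left; intro s _
    exact pv_sum_count_swap l (pvRots s)
  rw [h, pv_sum_group l (fun s => ((pvRots s).map (fun r => (l.count r : Int))).sum)]
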